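-- pv_equiv track=rewrite | github.com/freesunshine0316/lab-zp-joint | script.ontonotes/data_builder.py | get_prev_index
-- ===== SOURCE A (Python) =====
-- def get_prev_index(zp_index, wi2realwi_map):
--     while zp_index > 0:
--         if zp_index-1 in wi2realwi_map:
--             break
--         zp_index = zp_index - 1
--     if zp_index > 0: # A B *OP* *pro* C ==> 1
--         return wi2realwi_map[zp_index-1]
--     else: # *OP* *pro* A B C
--         return -1
-- ===== SOURCE B (Python) =====
-- def get_prev_index(zp_index, wi2realwi_map):
--     cands = [k for k in wi2realwi_map if 0 <= k < zp_index]
--     return wi2realwi_map[max(cands)] if cands else -1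
-- ===== Notes on version B (the rewrite author's own statement) =====
-- stated objective: idiomatic
-- what changed: Instead of decrementing zp_index step by step over the integer range until a mapped key is hit, B filters the dictionary's keys to those in [0, zp_index) and looks up the maximum one (or returns -1 if none).
import Mathlib
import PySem

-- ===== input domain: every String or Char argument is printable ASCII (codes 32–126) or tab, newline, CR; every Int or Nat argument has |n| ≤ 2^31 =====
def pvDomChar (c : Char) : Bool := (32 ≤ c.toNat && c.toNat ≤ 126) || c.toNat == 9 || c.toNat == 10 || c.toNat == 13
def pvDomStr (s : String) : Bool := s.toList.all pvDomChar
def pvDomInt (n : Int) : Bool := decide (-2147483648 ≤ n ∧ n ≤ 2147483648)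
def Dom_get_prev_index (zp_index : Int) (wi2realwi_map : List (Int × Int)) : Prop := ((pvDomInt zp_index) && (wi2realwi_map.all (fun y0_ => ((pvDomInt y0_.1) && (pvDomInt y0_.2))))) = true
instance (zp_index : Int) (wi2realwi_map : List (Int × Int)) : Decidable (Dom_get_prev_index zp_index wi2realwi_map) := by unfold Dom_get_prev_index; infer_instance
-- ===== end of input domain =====

-- B replaces A's step-by-step downward integer scan by a single filter over the map's keys plus a max; same value everywhere (objective: idiomatic).

-- ===== PORT A =====
-- first-match association-list lookup, m[k] (key is guaranteed present wherever A reads it)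
def pvLookup (m : List (Int × Int)) (k : Int) : Int :=
  match m.find? (fun p => p.1 == k) with
  | some p => p.2
  | none => -1

-- the 'while zp_index > 0: …' loop of A, returning the final zp_index
def get_prev_index_loop (m : List (Int × Int)) (zp : Int) : Int :=
  if _h : zp > 0 then
    if m.any (fun p => p.1 == zp - 1) then zp
    else get_prev_index_loop m (zp - 1)
  else zp
termination_by zp.toNat
decreasing_by omega

def get_prev_index (zp_index : Int) (wi2realwi_map : List (Int × Int)) : Int :=
  let z := get_prev_index_loop wi2realwi_map zp_index
  if z > 0 then pvLookup wi2realwi_map (z - 1)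
  else -1

-- ===== PORT B =====
def get_prev_index_alt (zp_index : Int) (wi2realwi_map : List (Int × Int)) : Int :=
  let cands := (wi2realwi_map.map Prod.fst).filter (fun k => decide (0 ≤ k ∧ k < zp_index))
  match PySem.List.max? cands (fun k => k) with
  | some k => pvLookup wi2realwi_map k
  | none => -1

-- ===== PRECONDITION & SPEC =====
def Spec_get_prev_index (zp_index : Int) (wi2realwi_map : List (Int × Int)) (out : Int) : Prop := out = get_prev_index_alt zp_index wi2realwi_map
instance (zp_index : Int) (wi2realwi_map : List (Int × Int)) (out : Int) : Decidable (Spec_get_prev_index zp_index wi2realwi_map out) := by unfold Spec_get_prev_index; infer_instance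

-- ===== CLAIM (what is proved, stated in full; the proofs are below) =====
def Claim_equal_get_prev_index : Prop := ∀ (zp_index : Int) (wi2realwi_map : List (Int × Int)), Dom_get_prev_index zp_index wi2realwi_map → Spec_get_prev_index zp_index wi2realwi_map (get_prev_index zp_index wi2realwi_map)

-- ===== LEMMAS AND PROOFS =====

-- key of the candidate list
def pvCands (zp : Int) (m : List (Int × Int)) : List Int :=
  (m.map Prod.fst).filter (fun k => decide (0 ≤ k ∧ k < zp))

lemma pvCands_mem {zp k : Int} {m : List (Int × Int)} :
    k ∈ pvCands zp m ↔ (k ∈ m.map Prod.fst ∧ 0 ≤ k ∧ k < zp) := by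
  simp [pvCands]

-- max? returns exactly a maximal member (for the identity key on Int the value is unique)
lemma max?_eq_of_isMax {l : List Int} {a : Int}
    (ha : a ∈ l) (hmax : ∀ x ∈ l, x ≤ a) :
    PySem.List.max? l (fun k => k) = some a := by
  cases hl : PySem.List.max? l (fun k => k) with
  | none =>
      rw [PySem.List.max?_eq_none_iff] at hl
      subst hl; cases ha
  | some b =>
      have hb := PySem.List.max?_mem hl
      have h1 : b ≤ a := hmax b hb
      have h2 : a ≤ b := PySem.List.max?_isMax hl a ha
      have : a = b := le_antisymm h2 h1
      rw [this]

-- when zp-1 is not a key, shrinking the bound from zp to zp-1 keeps the same candidates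
lemma pvCands_shrink {zp : Int} {m : List (Int × Int)}
    (h : m.any (fun p => p.1 == zp - 1) = false) :
    pvCands zp m = pvCands (zp - 1) m := by
  simp only [pvCands]
  apply List.filter_congr
  intro k hk
  simp only [List.any_eq_false, beq_iff_eq] at h
  rcases List.mem_map.mp hk with ⟨p, hp, rfl⟩
  have := h p hp
  simp only [decide_eq_decide]
  omega

-- the whole equivalence, by induction on the loop's fuel
lemma main_eq (m : List (Int × Int)) (zp : Int) :
    get_prev_index zp m = get_prev_index_alt zp m := by
  show (let z := get_prev_index_loop m zp;
        if z > 0 then pvLookup m (z - 1) else -1) =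
       (match PySem.List.max? (pvCands zp m) (fun k => k) with
        | some k => pvLookup m k
        | none => -1)
  induction hn : zp.toNat generalizing zp with
  | zero =>
      have hzp : zp ≤ 0 := by omega
      rw [get_prev_index_loop]
      simp only [show ¬ zp > 0 by omega, dif_neg, not_false_iff]
      have hc : pvCands zp m = [] := by
        apply List.eq_nil_iff_forall_not_mem.mpr
        intro k hk
        rcases pvCands_mem.mp hk with ⟨_, h1, h2⟩
        omega
      rw [hc]
      simp [PySem.List.max?]
  | succ n ih =>
      have hzp : zp > 0 := by omega
      rw [get_prev_index_loop]
      rw [dif_pos hzp]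
      cases hmem : m.any (fun p => p.1 == zp - 1) with
      | true =>
          -- loop breaks: result is m[zp-1]; candidates' max is zp-1
          have hk : (zp - 1) ∈ pvCands zp m := by
            apply pvCands_mem.mpr
            refine ⟨?_, by omega, by omega⟩
            simp only [List.any_eq_true, beq_iff_eq] at hmem
            rcases hmem with ⟨p, hp, hpk⟩
            exact List.mem_map.mpr ⟨p, hp, hpk⟩
          have hmax : ∀ x ∈ pvCands zp m, x ≤ zp - 1 := by
            intro x hx
            rcases pvCands_mem.mp hx with ⟨_, _, h2⟩
            omega
          rw [max?_eq_of_isMax hk hmax]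
          simp [hzp]
      | false =>
          rw [pvCands_shrink hmem]
          exact ih (zp - 1) (by omega)

-- ===== VERDICT (by name: the statement is the Claim_ definition above) =====
theorem get_prev_index_spec : Claim_equal_get_prev_index := by
  intro zp m _
  show get_prev_index zp m = get_prev_index_alt zp m
  exact main_eq m zp
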